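-- pv_equiv track=rewrite | github.com/smirfanshah/Blind75 | CodeSignal-InterviewPrac.py | solution6
-- ===== SOURCE A (Python) =====
-- def solution6(sentence):
--     new_s = ""
--     for letter in sentence:
--         s = ord(letter)
--
--         if letter.isalnum():
--
--             if s == ord('0'):
--                 s += 10
--             elif s == ord('A'):
--                 s += 26
--             elif s == ord('a'):
--                 s += 26
--
--             s-=1
--             new_s += chr(s)
--
--     result = []
--     for letter in set(new_s):
--         res = abs(ord(letter) - new_s.count(letter))
--         result.append(res)
--     result.sort()
--     return result
-- ===== SOURCE B (Python) =====
-- def solution6(sentence):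
--     transformed = []
--     for c in sentence:
--         if c.isalnum():
--             s = ord(c)
--             if s == 48:
--                 s += 10
--             elif s == 65 or s == 97:
--                 s += 26
--             transformed.append(chr(s - 1))
--     transformed.sort()
--     result = []
--     i = 0
--     n = len(transformed)
--     while i < n:
--         j = i + 1
--         while j < n and transformed[j] == transformed[i]:
--             j += 1
--         result.append(abs(ord(transformed[i]) - (j - i)))
--         i = j
--     result.sort()
--     return result
-- ===== Notes on version B (the rewrite author's own statement) =====
-- stated objective: alternative
-- what changed: Instead of iterating set(new_s) and rescanning the whole string with new_s.count for each distinct letter, B sorts the transformed characters once and computes each |code - count| in a single run-length scan over the sorted list (equal characters are adjacent), so no set and no repeated counting scans exist.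
import Mathlib
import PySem

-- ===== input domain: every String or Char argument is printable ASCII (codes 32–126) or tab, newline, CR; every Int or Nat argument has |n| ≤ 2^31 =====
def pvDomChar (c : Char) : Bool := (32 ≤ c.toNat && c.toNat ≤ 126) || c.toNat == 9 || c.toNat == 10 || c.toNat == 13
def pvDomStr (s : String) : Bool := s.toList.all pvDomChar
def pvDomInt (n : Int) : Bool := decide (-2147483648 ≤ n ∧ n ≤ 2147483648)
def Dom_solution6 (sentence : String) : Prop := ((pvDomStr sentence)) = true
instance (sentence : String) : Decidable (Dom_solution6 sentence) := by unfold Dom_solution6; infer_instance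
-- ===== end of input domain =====

-- B sorts the transformed characters once and computes |code - count| by a run-length scan,
-- instead of A's per-distinct-letter rescans over set(new_s) (alternative algorithm, same cost class).

-- ===== PORT A =====
-- str.isalnum, ported by hand: exact on the ASCII domain Dom_solution6 admits.
def pyIsalnum (c : Char) : Bool :=
  ('0' ≤ c && c ≤ '9') || ('A' ≤ c && c ≤ 'Z') || ('a' ≤ c && c ≤ 'z')

def solution6 (sentence : String) : List Int :=
  let new_s : List Char := sentence.toList.foldl (fun acc letter =>
    let s : Int := letter.toNat
    if pyIsalnum letter then
      let s := if s = 48 then s + 10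
               else if s = 65 then s + 26
               else if s = 97 then s + 26
               else s
      let s := s - 1
      acc ++ [Char.ofNat s.toNat]
    else acc) []
  -- 'for letter in set(new_s)': the loop order is CPython's hash order, not modelled;
  -- the returned value is order-independent because the list is sorted before returning.
  let result : List Int := (PySem.Set.ofList new_s).foldl (fun res letter =>
    res ++ [|(letter.toNat : Int) - (new_s.count letter : Int)|]) []
  PySem.List.sorted result (fun x => x) false

-- ===== PORT B =====
def tfB (c : Char) : Char :=
  let s : Int := c.toNat
  let s := if s = 48 then s + 10
           else if s = 65 ∨ s = 97 then s + 26
           else s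
  Char.ofNat (s - 1).toNat

-- the inner while loop of Source B: consume one run of equal chars, emit |code - run length|
def runScan : List Char → List Int
  | [] => []
  | c :: rest =>
      |(c.toNat : Int) - (1 + ((rest.takeWhile (· == c)).length : Int))| ::
        runScan (rest.dropWhile (· == c))
termination_by l => l.length
decreasing_by
  exact Nat.lt_succ_of_le (List.length_dropWhile_le _ _)

def solution6_alt (sentence : String) : List Int :=
  let transformed : List Char :=
    PySem.List.sorted ((sentence.toList.filter pyIsalnum).map tfB) (fun x => x) false
  PySem.List.sorted (runScan transformed) (fun x => x) false

-- ===== PRECONDITION & SPEC =====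
def Spec_solution6 (sentence : String) (out : List Int) : Prop := out = solution6_alt sentence
instance (sentence : String) (out : List Int) : Decidable (Spec_solution6 sentence out) := by unfold Spec_solution6; infer_instance

-- ===== CLAIM =====
def Claim_equal_solution6 : Prop := ∀ (sentence : String), Dom_solution6 sentence → Spec_solution6 sentence (solution6 sentence)

-- ===== LEMMAS AND PROOFS =====

-- A's per-character transform equals B's tfB.
theorem tfA_eq_tfB (c : Char) :
    Char.ofNat (((if (c.toNat : Int) = 48 then (c.toNat : Int) + 10
                  else if (c.toNat : Int) = 65 then (c.toNat : Int) + 26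
                  else if (c.toNat : Int) = 97 then (c.toNat : Int) + 26
                  else (c.toNat : Int)) - 1).toNat) = tfB c := by
  unfold tfB
  split_ifs with h1 h2 h3 <;> simp_all

theorem ofList_perm_of_perm {xs ys : List Char} (h : xs.Perm ys) :
    (PySem.Set.ofList xs).Perm (PySem.Set.ofList ys) := by
  refine (List.perm_ext_iff_of_nodup (PySem.Set.nodup_ofList xs) (PySem.Set.nodup_ofList ys)).2 ?_
  intro a
  simp [PySem.Set.mem_ofList, h.mem_iff]

-- On a ≤-sorted list (equal chars adjacent), the run-length scan produces, up to order,
-- |code - count| for each distinct character.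
theorem dropWhile_beq_not_mem {c : Char} {rest : List Char} (h : rest.Pairwise (· ≤ ·))
    (hle : ∀ d ∈ rest, c ≤ d) : c ∉ rest.dropWhile (· == c) := by
  induction rest with
  | nil => simp
  | cons a t ih =>
    by_cases hac : (a == c) = true
    · simp only [List.dropWhile_cons, hac, if_pos]
      exact ih h.tail (fun d hd => hle d (List.mem_cons_of_mem _ hd))
    · simp only [List.dropWhile_cons, hac, if_neg, Bool.false_eq_true, not_false_eq_true]
      intro hc
      rcases List.mem_cons.1 hc with rfl | hct
      · exact hac (by simp)
      · have h1 : a ≤ c := List.rel_of_pairwise_cons h hct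
        have h2 : c ≤ a := hle a List.mem_cons_self
        exact hac (by simp [le_antisymm h2 h1])

-- On a ≤-sorted list (equal chars adjacent), the run-length scan produces, up to order,
-- |code - count| for each distinct character.
theorem runScan_perm (S : List Char) (h : S.Pairwise (· ≤ ·)) :
    (runScan S).Perm
      ((PySem.Set.ofList S).map (fun c => |(c.toNat : Int) - (S.count c : Int)|)) := by
  induction S using runScan.induct with
  | case1 => simp [runScan]
  | case2 c rest ih =>
    have hrest : rest.Pairwise (· ≤ ·) := h.tail
    have hle : ∀ d ∈ rest, c ≤ d := fun d hd => List.rel_of_pairwise_cons h hd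
    set run := rest.takeWhile (· == c) with hrun
    set rest' := rest.dropWhile (· == c) with hrest'
    have hsplit : run ++ rest' = rest := List.takeWhile_append_dropWhile
    have hrunmem : ∀ x ∈ run, x = c := by
      intro x hx
      have := List.mem_takeWhile_imp hx
      simpa using this
    have hrest'pw : rest'.Pairwise (· ≤ ·) :=
      hrest.sublist (List.dropWhile_sublist _)
    have hnotmem : c ∉ rest' := dropWhile_beq_not_mem hrest hle
    have hcount_c : ((c :: rest).count c : Int) = 1 + (run.length : Int) := by
      have h1 : run.count c = run.length :=
        List.count_eq_length.2 (fun b hb => ((hrunmem b hb).symm ▸ rfl))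
      have h2 : rest'.count c = 0 := List.count_eq_zero.2 hnotmem
      have h3 : rest.count c = run.length := by
        rw [← hsplit, List.count_append, h1, h2]; omega
      rw [List.count_cons_self, h3]; push_cast; ring
    have hcount_d : ∀ d ∈ rest', (c :: rest).count d = rest'.count d := by
      intro d hd
      have hne : d ≠ c := fun e => hnotmem (e ▸ hd)
      have h1 : run.count d = 0 :=
        List.count_eq_zero.2 (fun hx => hne (hrunmem d hx))
      rw [List.count_cons_of_ne (Ne.symm hne), ← hsplit, List.count_append, h1]
      omega
    have hsetperm : (PySem.Set.ofList (c :: rest)).Perm (c :: PySem.Set.ofList rest') := by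
      refine (List.perm_ext_iff_of_nodup (PySem.Set.nodup_ofList _) ?_).2 ?_
      · exact List.nodup_cons.2 ⟨by simpa [PySem.Set.mem_ofList] using hnotmem,
          PySem.Set.nodup_ofList _⟩
      · intro a
        simp only [PySem.Set.mem_ofList, List.mem_cons]
        constructor
        · rintro (rfl | ha)
          · exact Or.inl rfl
          · rw [← hsplit] at ha
            rcases List.mem_append.1 ha with hr | hr
            · exact Or.inl (hrunmem a hr)
            · exact Or.inr hr
        · rintro (rfl | ha)
          · exact Or.inl rfl
          · exact Or.inr (by rw [← hsplit]; exact List.mem_append.2 (Or.inr ha))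
    refine List.Perm.trans ?_ ((hsetperm.map _).symm)
    have e1 : runScan (c :: rest)
        = |(c.toNat : Int) - (1 + (run.length : Int))| :: runScan rest' := by
      rw [runScan]
    rw [e1, List.map_cons, ← hcount_c]
    refine List.Perm.cons _ ?_
    have hmap : (PySem.Set.ofList rest').map
          (fun d => |(d.toNat : Int) - (((c :: rest).count d : Nat) : Int)|)
        = (PySem.Set.ofList rest').map
          (fun d => |(d.toNat : Int) - ((rest'.count d : Nat) : Int)|) :=
      List.map_congr_left (fun d hd => by
        rw [hcount_d d ((PySem.Set.mem_ofList _ _).1 hd)])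
    rw [hmap]
    exact ih hrest'pw

-- ===== VERDICT =====
theorem solution6_spec : Claim_equal_solution6 := by
  intro sentence _
  unfold Spec_solution6 solution6 solution6_alt
  simp only [PySem.List.foldl_append_if, PySem.List.foldl_append_singleton_eq_map,
    List.nil_append]
  simp only [tfA_eq_tfB]
  set L : List Char := (sentence.toList.filter pyIsalnum).map tfB with hL
  set S : List Char := PySem.List.sorted L (fun x => x) false with hS
  have hSL : S.Perm L := PySem.List.sorted_perm L _ _
  have hpw : S.Pairwise (· ≤ ·) := by
    simpa using PySem.List.sorted_pairwise L (fun x => x)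
  refine ((PySem.List.sorted_id_eq_sorted_id_iff_perm _ _).2 ?_).symm
  have h1 := runScan_perm S hpw
  have h2 : ((PySem.Set.ofList S).map (fun c => |(c.toNat : Int) - (S.count c : Int)|)).Perm
      ((PySem.Set.ofList L).map (fun c => |(c.toNat : Int) - (L.count c : Int)|)) := by
    have : (fun c : Char => |(c.toNat : Int) - (S.count c : Int)|)
         = (fun c : Char => |(c.toNat : Int) - (L.count c : Int)|) := by
      funext c; rw [hSL.count_eq c]
    rw [this]
    exact (ofList_perm_of_perm hSL).map _
  exact h1.trans h2
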